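-- pv_equiv track=rewrite | github.com/anshawasthi01/Supreme-DSA | 4. Searching & Sorting/3. Searching & Sorting Class - III/3. Find odd occuring element in a array.py | solve
-- ===== SOURCE A (Python) =====
-- def solve(arr):
--     s = 0
--     e = len(arr) - 1
--     mid = s + (e-s)//2
--
--     while(s <= e):
--         if(s == e):
--         # single element
--             return s
--
--
--         # 2 cases -> mid - even or mid - odd
--         if(mid%2 == 0 ):
--             if(arr[mid] == arr[mid + 1] ):
--                 s = mid + 2
--
--             else:
--                 e = mid
--
--         else:
--             if(arr[mid] == arr[mid-1]):
--                 s = mid + 1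
--
--             else:
--                 e = mid - 1
--         mid = s + (e-s)//2
--     return -1
-- ===== SOURCE B (Python) =====
-- def solve(arr):
--     # Recursive divide-and-conquer in (offset, count) coordinates: the live window is
--     # the cnt elements starting at lo; the probed pair always starts at the even
--     # offset lo + 2*((cnt-1)//4), so one comparison drives the recursion.
--     def go(lo, cnt):
--         if cnt <= 0:
--             return -1
--         if cnt == 1:
--             return lo
--         m = lo + 2 * ((cnt - 1) // 4)
--         if arr[m] == arr[m + 1]:
--             return go(m + 2, lo + cnt - m - 2)
--         return go(lo, m - lo + 1)
--     return go(0, len(arr))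
-- ===== Notes on version B (the rewrite author's own statement) =====
-- stated objective: alternative
-- what changed: Replaced A's iterative while-loop over an (s,e) index interval with its duplicated mid-even/mid-odd branch pair by a recursive helper over (offset,count) window coordinates whose probed pair starts at the even offset lo+2*((cnt-1)//4), so one comparison replaces A's two mirrored branches.
import Mathlib
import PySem

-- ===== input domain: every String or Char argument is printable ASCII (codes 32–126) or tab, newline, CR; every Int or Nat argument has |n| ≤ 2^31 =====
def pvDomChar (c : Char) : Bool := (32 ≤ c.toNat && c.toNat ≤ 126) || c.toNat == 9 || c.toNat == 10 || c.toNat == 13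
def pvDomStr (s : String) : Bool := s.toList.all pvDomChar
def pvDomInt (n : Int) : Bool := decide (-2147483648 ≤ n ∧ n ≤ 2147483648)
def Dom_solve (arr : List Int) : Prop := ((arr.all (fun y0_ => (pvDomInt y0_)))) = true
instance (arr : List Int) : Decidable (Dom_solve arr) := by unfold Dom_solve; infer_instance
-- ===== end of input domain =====

-- B replaces A's iterative (s,e)-interval binary search with mirrored mid-even/mid-odd branches
-- by a recursive helper over (offset, count) window coordinates probing one pair per call: alternative.

-- ===== PORT A =====
-- A's while loop, transliterated as recursion on the interval state (s, e); mid is the value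
-- s + (e-s)//2 that A (re)computes for the current s, e before each iteration.  fuel is only
-- a totality guard: each iteration shrinks e - s by at least 1, so fuel = len(arr) + 1 is
-- never exhausted (the -1 at fuel 0 is unreachable).  Python indexing never goes out of range
-- in the loop (0 ≤ index ≤ e < len), so pyGetD's default 0 is never the result of a lookup.
def solve_loop (arr : List Int) : Nat → Int → Int → Int
  | 0, _, _ => -1
  | fuel + 1, s, e =>
    if s ≤ e then
      if s = e then s
      else
        let mid := s + PySem.Int.floordiv (e - s) 2
        if PySem.Int.mod mid 2 = 0 then
          if PySem.List.pyGetD arr mid 0 = PySem.List.pyGetD arr (mid + 1) 0 then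
            solve_loop arr fuel (mid + 2) e
          else
            solve_loop arr fuel s mid
        else
          if PySem.List.pyGetD arr mid 0 = PySem.List.pyGetD arr (mid - 1) 0 then
            solve_loop arr fuel (mid + 1) e
          else
            solve_loop arr fuel s (mid - 1)
    else -1

def solve (arr : List Int) : Int := solve_loop arr (arr.length + 1) 0 (arr.length - 1)

-- ===== PORT B =====
-- Source B's recursive helper go(lo, cnt) over window coordinates: the window is the cnt
-- elements starting at offset lo, and the probed pair starts at lo + 2*((cnt-1)//4).
-- fuel is only a totality guard: cnt shrinks by at least 1 per call.
def solve_go (arr : List Int) : Nat → Int → Int → Int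
  | 0, _, _ => -1
  | fuel + 1, lo, cnt =>
    if cnt ≤ 0 then -1
    else if cnt = 1 then lo
    else
      let m := lo + 2 * PySem.Int.floordiv (cnt - 1) 4
      if PySem.List.pyGetD arr m 0 = PySem.List.pyGetD arr (m + 1) 0 then
        solve_go arr fuel (m + 2) (lo + cnt - m - 2)
      else
        solve_go arr fuel lo (m - lo + 1)

def solve_alt (arr : List Int) : Int := solve_go arr (arr.length + 1) 0 (arr.length)

-- ===== PRECONDITION & SPEC =====
def Spec_solve (arr : List Int) (out : Int) : Prop := out = solve_alt arr
instance (arr : List Int) (out : Int) : Decidable (Spec_solve arr out) := by unfold Spec_solve; infer_instance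

-- ===== CLAIM =====
def Claim_equal_solve : Prop := ∀ (arr : List Int), Dom_solve arr → Spec_solve arr (solve arr)

-- ===== LEMMAS AND PROOFS =====

-- A's two mirrored branches collapse: when mid is even the probed pair starts at mid itself,
-- and when mid is odd A's comparison arr[mid] == arr[mid-1] is the pair starting at mid-1
-- read backwards, with identical successor intervals.  For an EVEN left end s (the only
-- reachable case, since s starts at 0 and moves to even positions), that pair start equals
-- s + 2*((e-s)//4) = lo + 2*((cnt-1)//4) in B's window coordinates lo = s, cnt = e - s + 1,
-- and both successor states correspond again, with the new offset still even.
lemma loop_eq_go (arr : List Int) :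
    ∀ fuel : Nat, ∀ s e : Int, 2 ∣ s →
      solve_loop arr fuel s e = solve_go arr fuel s (e - s + 1) := by
  intro fuel
  induction fuel with
  | zero => intro s e _; rfl
  | succ n ih =>
    intro s e hs
    rw [solve_loop, solve_go]
    by_cases hle : s ≤ e
    · by_cases heq : s = e
      · simp [heq]
      · have hlt : s < e := lt_of_le_of_ne hle heq
        simp only [hle, if_true, heq, if_false,
          show ¬ e - s + 1 ≤ (0:Int) by omega,
          show ¬ e - s + 1 = (1:Int) by omega, if_false]
        have hd1 : PySem.Int.floordiv (e - s) 2 = (e - s) / 2 :=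
          PySem.Int.floordiv_eq_ediv_of_pos (by norm_num)
        have hd2 : PySem.Int.floordiv (e - s + 1 - 1) 4 = (e - s) / 4 := by
          rw [show e - s + 1 - 1 = e - s by ring]
          exact PySem.Int.floordiv_eq_ediv_of_pos (by norm_num)
        have hmd : PySem.Int.mod (s + PySem.Int.floordiv (e - s) 2) 2
            = (s + PySem.Int.floordiv (e - s) 2) % 2 :=
          PySem.Int.mod_eq_emod_of_pos (by norm_num)
        set mid := s + PySem.Int.floordiv (e - s) 2 with hmid
        set m := s + 2 * PySem.Int.floordiv (e - s + 1 - 1) 4 with hm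
        rcases Int.emod_two_eq mid with hr | hr
        · -- mid even: the probed pair starts at mid, and m = mid
          have hmm : m = mid := by rw [hm, hmid, hd1, hd2]; omega
          simp only [hmd, hr, if_true, hmm]
          by_cases hc : PySem.List.pyGetD arr mid 0 = PySem.List.pyGetD arr (mid + 1) 0
          · rw [if_pos hc, if_pos hc,
              show s + (e - s + 1) - mid - 2 = e - (mid + 2) + 1 by ring]
            exact ih (mid + 2) e (by omega)
          · rw [if_neg hc, if_neg hc]
            exact ih s mid hs
        · -- mid odd: the probed pair starts at mid - 1 = m
          have hmm : m = mid - 1 := by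
            rw [hm, hmid, hd1, hd2]
            have : (s + (e - s) / 2) % 2 = 1 := by rw [← hd1, ← hmid]; exact hr
            omega
          simp only [hmd, hr, if_neg (by norm_num : (1:Int) ≠ 0), hmm]
          rw [show mid - 1 + 1 = mid by ring]
          by_cases hc : PySem.List.pyGetD arr mid 0 = PySem.List.pyGetD arr (mid - 1) 0
          · rw [if_pos hc, if_pos hc.symm,
              show s + (e - s + 1) - (mid - 1) - 2 = e - (mid + 1) + 1 by ring,
              show mid - 1 + 2 = mid + 1 by ring]
            exact ih (mid + 1) e (by omega)
          · rw [if_neg hc, if_neg (fun h' => hc h'.symm)]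
            exact ih s (mid - 1) hs
    · simp [hle, show e - s + 1 ≤ (0:Int) by omega]

-- ===== VERDICT =====
theorem solve_spec : Claim_equal_solve := by
  intro arr _
  unfold Spec_solve solve solve_alt
  have := loop_eq_go arr (arr.length + 1) 0 ((arr.length : Int) - 1) ⟨0, by ring⟩
  rwa [show (arr.length : Int) - 1 - 0 + 1 = (arr.length : Int) by ring] at this
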